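-- pv_equiv track=rewrite | github.com/Yubelo3/SearchEngineDataPreperation | migrate_db.py | extract_continuous_sequences
-- ===== SOURCE A (Python) =====
-- def extract_continuous_sequences(positions, terms):
--     pairs = sorted(zip(positions, terms), key=lambda x: x[0])
--     sequences = []
--     current_seq = []
--     prev_pos = None
--
--     for pos, term in pairs:
--         if prev_pos is None or pos == prev_pos + 1:
--             current_seq.append(term)
--         else:
--             if len(current_seq) >= 1:
--                 sequences.append(current_seq)
--             current_seq = [term]
--         prev_pos = pos
--
--     if current_seq:
--         sequences.append(current_seq)
--     return sequences
-- ===== SOURCE B (Python) =====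
-- def _groupby_runs(items, key):
--     # group CONSECUTIVE items sharing an equal key (like itertools.groupby)
--     groups = []
--     for it in items:
--         k = key(it)
--         if groups and groups[-1][0] == k:
--             groups[-1][1].append(it)
--         else:
--             groups.append((k, [it]))
--     return groups
--
--
-- def extract_continuous_sequences(positions, terms):
--     pairs = sorted(zip(positions, terms), key=lambda x: x[0])
--     # along a run of consecutive positions, pos - index is constant,
--     # so grouping by that derived offset yields exactly the runs
--     groups = _groupby_runs(enumerate(pairs), key=lambda ip: ip[1][0] - ip[0])
--     return [[term for _, (_, term) in grp] for _, grp in groups]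
-- ===== Notes on version B (the rewrite author's own statement) =====
-- stated objective: idiomatic
-- what changed: Replaces A's prev_pos/current_seq state machine with a groupby over the derived key pos - index (constant along a run of consecutive positions), then maps each group to its terms.
import Mathlib
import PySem

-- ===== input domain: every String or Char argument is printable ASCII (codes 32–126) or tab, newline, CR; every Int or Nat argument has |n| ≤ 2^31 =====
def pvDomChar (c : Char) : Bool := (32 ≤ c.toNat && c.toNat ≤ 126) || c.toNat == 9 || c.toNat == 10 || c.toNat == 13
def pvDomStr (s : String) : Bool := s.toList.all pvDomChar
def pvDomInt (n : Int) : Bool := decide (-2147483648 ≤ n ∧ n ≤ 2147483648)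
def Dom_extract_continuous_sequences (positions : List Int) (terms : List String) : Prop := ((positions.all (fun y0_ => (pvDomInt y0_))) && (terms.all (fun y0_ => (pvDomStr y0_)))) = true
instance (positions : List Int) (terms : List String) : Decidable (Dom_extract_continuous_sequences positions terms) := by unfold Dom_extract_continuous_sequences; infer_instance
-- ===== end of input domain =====

-- B replaces A's prev_pos/current_seq state machine with a groupby on the derived key
-- pos - index (constant along a run of consecutive positions); same cost, more idiomatic.

-- ===== PORT A =====
-- A's loop state: (sequences, current_seq, prev_pos)
def csStepA (st : List (List String) × List String × Option Int) (pt : Int × String) :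
    List (List String) × List String × Option Int :=
  match st, pt with
  | (seqs, cur, prev), (pos, term) =>
    match prev with
    | none => (seqs, cur ++ [term], some pos)
    | some p =>
      if pos = p + 1 then (seqs, cur ++ [term], some pos)
      else ((if 1 ≤ cur.length then seqs ++ [cur] else seqs), [term], some pos)

def extract_continuous_sequences (positions : List Int) (terms : List String) : List (List String) :=
  let pairs := PySem.List.sorted (positions.zip terms) (fun x => x.1)
  let st := pairs.foldl csStepA ([], [], none)
  if st.2.1 ≠ [] then st.1 ++ [st.2.1] else st.1

-- ===== PORT B =====
-- Source B's _groupby_runs: group consecutive items sharing an equal key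
def csGroupStep (groups : List (Int × List (Int × (Int × String)))) (it : Int × (Int × String)) :
    List (Int × List (Int × (Int × String))) :=
  let k := it.2.1 - it.1
  match groups.getLast? with
  | some g => if g.1 = k then groups.dropLast ++ [(g.1, g.2 ++ [it])] else groups ++ [(k, [it])]
  | none => groups ++ [(k, [it])]

def extract_continuous_sequences_alt (positions : List Int) (terms : List String) : List (List String) :=
  let pairs := PySem.List.sorted (positions.zip terms) (fun x => x.1)
  let groups := (PySem.List.enumerate pairs).foldl csGroupStep []
  groups.map (fun g => g.2.map (fun it => it.2.2))

-- ===== PRECONDITION & SPEC =====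
def Spec_extract_continuous_sequences (positions : List Int) (terms : List String) (out : List (List String)) : Prop := out = extract_continuous_sequences_alt positions terms
instance (positions : List Int) (terms : List String) (out : List (List String)) : Decidable (Spec_extract_continuous_sequences positions terms out) := by unfold Spec_extract_continuous_sequences; infer_instance

-- ===== CLAIM (what is proved, stated in full; the proofs are below) =====
def Claim_equal_extract_continuous_sequences : Prop := ∀ (positions : List Int) (terms : List String), Dom_extract_continuous_sequences positions terms → Spec_extract_continuous_sequences positions terms (extract_continuous_sequences positions terms)

-- ===== LEMMAS AND PROOFS =====

-- the common characterisation: the runs of consecutive positions, given the current run and previous position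
def csRuns (cur : List String) (p : Int) : List (Int × String) → List (List String)
  | [] => [cur]
  | (q, u) :: ps => if q = p + 1 then csRuns (cur ++ [u]) q ps else cur :: csRuns [u] q ps

def csTerms (gs : List (Int × List (Int × (Int × String)))) : List (List String) :=
  gs.map (fun g => g.2.map (fun it => it.2.2))

-- A's fold computes csRuns
theorem csA_runs (ps : List (Int × String)) (seqs : List (List String)) (cur : List String)
    (p : Int) (hcur : cur ≠ []) :
    (if (ps.foldl csStepA (seqs, cur, some p)).2.1 ≠ [] then
        (ps.foldl csStepA (seqs, cur, some p)).1 ++ [(ps.foldl csStepA (seqs, cur, some p)).2.1]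
      else (ps.foldl csStepA (seqs, cur, some p)).1) = seqs ++ csRuns cur p ps := by
  induction ps generalizing seqs cur p with
  | nil => simp [csRuns, hcur]
  | cons hd tl ih =>
    obtain ⟨q, u⟩ := hd
    by_cases h : q = p + 1
    · subst h
      simp only [List.foldl_cons, csStepA, if_true, csRuns]
      rw [ih seqs (cur ++ [u]) (p + 1) (by simp)]
    · have hlen : 1 ≤ cur.length := by
        cases cur with
        | nil => exact absurd rfl hcur
        | cons a l => simp
      simp only [List.foldl_cons, csStepA, if_neg h, csRuns, hlen, if_pos]
      rw [ih (seqs ++ [cur]) [u] q (by simp)]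
      simp

-- B's fold computes csRuns
theorem csB_runs (ps : List (Int × String)) (i p : Int)
    (G : List (Int × List (Int × (Int × String)))) (cur : List (Int × (Int × String))) :
    csTerms ((PySem.List.enumerate ps (i + 1)).foldl csGroupStep (G ++ [(p - i, cur)]))
      = csTerms G ++ csRuns (cur.map (fun it => it.2.2)) p ps := by
  induction ps generalizing i p G cur with
  | nil => simp [PySem.List.enumerate_nil, csTerms, csRuns]
  | cons hd tl ih =>
    obtain ⟨q, u⟩ := hd
    rw [PySem.List.enumerate_cons]
    by_cases h : q = p + 1
    · have hk : p - i = q - (i + 1) := by omega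
      simp only [List.foldl_cons, csGroupStep, List.getLast?_concat, hk, if_true,
        List.dropLast_concat]
      rw [ih (i + 1) q G (cur ++ [(i + 1, (q, u))])]
      simp [csRuns, h, csTerms]
    · have hk : ¬ (p - i = q - (i + 1)) := by omega
      simp only [List.foldl_cons, csGroupStep, List.getLast?_concat, if_neg hk]
      have := ih (i + 1) q (G ++ [(p - i, cur)]) [(i + 1, (q, u))]
      rw [this]
      simp [csRuns, h, csTerms]

-- ===== VERDICT (by name: the statement is the Claim_ definition above) =====
theorem extract_continuous_sequences_spec : Claim_equal_extract_continuous_sequences := by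
  intro positions terms _
  unfold Spec_extract_continuous_sequences extract_continuous_sequences extract_continuous_sequences_alt
  cases hp : PySem.List.sorted (positions.zip terms) (fun x => x.1) with
  | nil => simp
  | cons hd tl =>
    obtain ⟨pos, t⟩ := hd
    have hA := csA_runs tl [] [t] pos (by simp)
    have hB := csB_runs tl 0 pos [] [(0, (pos, t))]
    simp only [List.foldl_cons, csStepA] at hA ⊢
    rw [PySem.List.enumerate_cons]
    simp only [List.foldl_cons, csGroupStep]
    simp only [csTerms, List.map_nil, List.nil_append, List.map_cons] at hA hB ⊢
    rw [hA]
    rw [show (0:Int) + 1 = 0 + 1 by rfl] at hB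
    simpa using hB.symm
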